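-- pv_equiv track=rewrite | github.com/FermiParadox/TorBrowser_mouse_track_deanon | calibration/angle_conversion.py | _xdotool_angle
-- ===== SOURCE A (Python) =====
-- def _xdotool_angle(angle):
--     """"""
--     if 0 <= angle <= 90:
--         return -angle + 90
--     if 90 < angle <= 360:
--         return -angle + 90 + 360
--
--     if angle < 0:
--         return _xdotool_angle(angle + 360)
--
--     if angle > 360:
--         raise ValueError(f"Max angle: 360deg. Angle provided {angle}")
-- ===== SOURCE B (Python) =====
-- def _xdotool_angle(angle):
--     """"""
--     if angle > 360:
--         raise ValueError(f"Max angle: 360deg. Angle provided {angle}")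
--     a = angle % 360
--     if 90 < a:
--         return 450 - a
--     return 90 - a
-- ===== Notes on version B (the rewrite author's own statement) =====
-- stated objective: simpler
-- what changed: Replaces the recursive repeated +360 normalization and the ordered guard chain by a single closed-form modulo (angle % 360) followed by one comparison.
-- outside the precondition, e.g. on _xdotool_angle(-355000): A returns 130, B returns 130
import Mathlib
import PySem

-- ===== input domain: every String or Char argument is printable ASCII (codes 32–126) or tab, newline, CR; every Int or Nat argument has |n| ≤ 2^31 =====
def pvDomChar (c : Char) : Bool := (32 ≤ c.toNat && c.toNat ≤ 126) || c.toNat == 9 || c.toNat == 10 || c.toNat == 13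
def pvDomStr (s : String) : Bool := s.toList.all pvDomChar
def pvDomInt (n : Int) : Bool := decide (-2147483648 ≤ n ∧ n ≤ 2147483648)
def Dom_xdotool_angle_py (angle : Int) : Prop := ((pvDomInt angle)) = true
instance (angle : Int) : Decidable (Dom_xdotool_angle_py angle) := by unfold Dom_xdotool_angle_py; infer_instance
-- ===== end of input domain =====

-- ===== PORT A =====
-- Literal port of A: ordered guards; the recursive +360 normalization for negatives;
-- angle > 360 raises ValueError in Python and is excluded by Pre_ (the final branch is unreachable there).
def xdotool_angle_py (angle : Int) : Int :=
  if 0 ≤ angle ∧ angle ≤ 90 then -angle + 90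
  else if 90 < angle ∧ angle ≤ 360 then -angle + 90 + 360
  else if angle < 0 then xdotool_angle_py (angle + 360)
  else 0
termination_by (-angle).toNat
decreasing_by omega

-- ===== PORT B =====
-- Port of B: closed-form modulo normalization then one comparison (angle > 360 raises, excluded by Pre_).
def xdotool_angle_py_alt (angle : Int) : Int :=
  if angle > 360 then 0
  else
    let a := PySem.Int.mod angle 360
    if 90 < a then 450 - a else 90 - a

-- ===== PRECONDITION & SPEC =====
-- Pre_ excludes the inputs angle > 360, on which Python A raises ValueError, and very negative
-- angles (below -350000), on which A's one-frame-per-360 recursion overflows Python's stack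
-- (RecursionError near angle = -358920; the exact limit is environment-dependent, hence the margin).
def Pre_xdotool_angle_py (angle : Int) : Prop := -350000 ≤ angle ∧ angle ≤ 360
instance (angle : Int) : Decidable (Pre_xdotool_angle_py angle) := by unfold Pre_xdotool_angle_py; infer_instance
def pvWitness_xdotool_angle_py : Int := (-45)
def Spec_xdotool_angle_py (angle : Int) (out : Int) : Prop := out = xdotool_angle_py_alt angle
instance (angle : Int) (out : Int) : Decidable (Spec_xdotool_angle_py angle out) := by unfold Spec_xdotool_angle_py; infer_instance

-- ===== CLAIM (what is proved, stated in full; the proofs are below) =====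
def Claim_equal_xdotool_angle_py : Prop := ∀ (angle : Int), Dom_xdotool_angle_py angle → Pre_xdotool_angle_py angle → Spec_xdotool_angle_py angle (xdotool_angle_py angle)

-- ===== LEMMAS AND PROOFS =====

theorem alt_mod (angle : Int) : xdotool_angle_py_alt angle =
    if angle > 360 then 0
    else if 90 < angle % 360 then 450 - angle % 360 else 90 - angle % 360 := by
  rw [xdotool_angle_py_alt, PySem.Int.mod_eq_emod_of_pos (a := angle) (by norm_num)]

theorem key : ∀ (n : Nat) (angle : Int), (-angle).toNat ≤ n → angle ≤ 360 →
    xdotool_angle_py angle = xdotool_angle_py_alt angle := by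
  intro n
  induction n with
  | zero =>
    intro angle hn h
    rw [xdotool_angle_py, alt_mod]
    have h0 : 0 ≤ angle := by omega
    split_ifs with h1 h2 h3 h4 h5 h6 <;> omega
  | succ n ih =>
    intro angle hn h
    rw [xdotool_angle_py]
    by_cases h1 : 0 ≤ angle ∧ angle ≤ 90
    · rw [if_pos h1, alt_mod]
      split_ifs <;> omega
    · rw [if_neg h1]
      by_cases h2 : 90 < angle ∧ angle ≤ 360
      · rw [if_pos h2, alt_mod]
        split_ifs <;> omega
      · rw [if_neg h2, if_pos (by omega : angle < 0),
          ih (angle + 360) (by omega) (by omega), alt_mod, alt_mod]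
        have : (angle + 360) % 360 = angle % 360 := Int.add_emod_right angle 360
        split_ifs <;> omega

-- ===== VERDICT (by name: the statement is the Claim_ definition above) =====
theorem xdotool_angle_py_spec : Claim_equal_xdotool_angle_py := by
  intro angle _ hpre
  exact key (-angle).toNat angle le_rfl hpre.2
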